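-- pv_equiv track=rewrite | github.com/dahaliahowell/Fibonacci | fib.py | fib_check
-- ===== SOURCE A (Python) =====
-- def fib_check(lst):
--     target = lst[0]
--     counter = 0
--     while target > fib(counter):
--         counter+=1
--     if counter != target:
--         return False
--     return lst == genFib(counter, counter + len(lst))
--
-- def fib(x):
--     if x == 0:
--         return 0
--     elif x < 3:
--         return 1
--     else:
--         return fib(x-1) + fib(x-2)
--
-- def genFib(start, end):
--     lst = []
--     for i in range(start, end):
--         lst += [fib(i)]
--     return lst
-- ===== SOURCE B (Python) =====
-- def fib_check(lst):
--     # A's search loop finds the least n with fib(n) >= lst[0] and demands n == lst[0];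
--     # that holds exactly for lst[0] in {0, 1, 5, 6} (fib(n-1) < n <= fib(n) fails elsewhere),
--     # so the search is replaced by that closed-form test and fib is computed iteratively.
--     t = lst[0]
--     if t not in (0, 1, 5, 6):
--         return False
--     a, b = 0, 1
--     for _ in range(t):
--         a, b = b, a + b
--     for x in lst:
--         if x != a:
--             return False
--         a, b = b, a + b
--     return True
-- ===== Notes on version B (the rewrite author's own statement) =====
-- stated objective: faster
-- what changed: A searches for the least n with fib(n) >= lst[0] using an exponential doubly-recursive fib and then regenerates the expected list with that same recursive fib; B replaces the search by the closed-form test lst[0] in {0,1,5,6} (the only values t with fib(t-1) < t <= fib(t)) and checks the list in one pass with an iterative Fibonacci pair.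
-- outside the precondition, e.g. on fib_check([]): A raises IndexError, B raises IndexError
import Mathlib
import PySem

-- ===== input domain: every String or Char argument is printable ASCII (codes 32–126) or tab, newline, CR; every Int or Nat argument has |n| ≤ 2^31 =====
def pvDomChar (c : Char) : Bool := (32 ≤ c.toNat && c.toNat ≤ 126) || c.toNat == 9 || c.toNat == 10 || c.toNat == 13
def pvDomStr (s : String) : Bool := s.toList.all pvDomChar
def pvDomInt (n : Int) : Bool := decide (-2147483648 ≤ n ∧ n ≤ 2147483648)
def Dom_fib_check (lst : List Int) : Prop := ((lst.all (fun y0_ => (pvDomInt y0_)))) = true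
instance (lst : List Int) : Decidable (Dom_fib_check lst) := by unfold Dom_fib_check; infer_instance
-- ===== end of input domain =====

-- B replaces A's exponential recursive fib and its linear search by a closed-form test plus
-- iterative fib pairs (objective: faster; asymptotic). Equivalence is about the return value.

-- ===== PORT A =====
-- fib(x), literal recursion
def fibA (x : Int) : Int :=
  if x = 0 then 0
  else if x < 3 then 1
  else fibA (x - 1) + fibA (x - 2)
termination_by x.toNat
decreasing_by all_goals omega

-- lemmas the ports' termination proofs cite (loopA's measure needs fibA ≥ x - 2)
theorem fibA_pos (x : Int) (h : 1 ≤ x) : 1 ≤ fibA x := by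
  rw [fibA]
  split_ifs with h0 h3
  · omega
  · omega
  · have h1 := fibA_pos (x - 1) (by omega)
    have h2 := fibA_pos (x - 2) (by omega)
    omega
termination_by x.toNat
decreasing_by all_goals omega

theorem fibA_ge (x : Int) : x - 2 ≤ fibA x := by
  rw [fibA]
  split_ifs with h0 h3
  · omega
  · omega
  · have h1 := fibA_ge (x - 1)
    have h2 := fibA_pos (x - 2) (by omega)
    omega
termination_by x.toNat
decreasing_by all_goals omega

-- the while loop: while target > fib(counter): counter += 1
def loopA (target counter : Int) : Int :=
  if target > fibA counter then loopA target (counter + 1) else counter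
termination_by (target + 2 - counter).toNat
decreasing_by
  have h := fibA_ge counter
  omega

-- genFib(start, end)
def genFibA (s e : Int) : List Int :=
  (PySem.List.pyRange s e 1).foldl (fun acc i => acc ++ [fibA i]) []

def fib_check (lst : List Int) : Bool :=
  match PySem.List.pyGet? lst 0 with
  | none => false        -- lst[0] raises IndexError; excluded by Pre_
  | some target =>
    let counter := loopA target 0
    if counter ≠ target then false
    else decide (lst = genFibA counter (counter + lst.length))

-- ===== PORT B =====
-- the element-check loop: for x in lst: if x != a: return False; a, b = b, a+b
def chkB (a b : Int) (xs : List Int) : Bool :=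
  match xs with
  | [] => true
  | x :: r => if x ≠ a then false else chkB b (a + b) r

def fib_check_alt (lst : List Int) : Bool :=
  match PySem.List.pyGet? lst 0 with
  | none => false        -- lst[0] raises IndexError; excluded by Pre_
  | some t =>
    if t = 0 ∨ t = 1 ∨ t = 5 ∨ t = 6 then
      let p := (PySem.List.pyRange 0 t 1).foldl
        (fun (p : Int × Int) _ => (p.2, p.1 + p.2)) (0, 1)
      chkB p.1 p.2 lst
    else false

-- ===== PRECONDITION & SPEC =====
-- Pre_ excludes only the empty list, on which A's 'lst[0]' raises IndexError.
def Pre_fib_check (lst : List Int) : Prop := lst ≠ []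
instance (lst : List Int) : Decidable (Pre_fib_check lst) := by unfold Pre_fib_check; infer_instance
def pvWitness_fib_check : List Int := ([0, 1, 1, 2, 3])

def Spec_fib_check (lst : List Int) (out : Bool) : Prop := out = fib_check_alt lst
instance (lst : List Int) (out : Bool) : Decidable (Spec_fib_check lst out) := by unfold Spec_fib_check; infer_instance

-- ===== CLAIM (what is proved, stated in full; the proofs are below) =====
def Claim_equal_fib_check : Prop := ∀ (lst : List Int), Dom_fib_check lst → Pre_fib_check lst → Spec_fib_check lst (fib_check lst)

-- ===== LEMMAS AND PROOFS =====
theorem fibA_0 : fibA 0 = 0 := by rw [fibA]; norm_num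
theorem fibA_1 : fibA 1 = 1 := by rw [fibA]; norm_num
theorem fibA_2 : fibA 2 = 1 := by rw [fibA]; norm_num
theorem fibA_3 : fibA 3 = 2 := by rw [fibA]; norm_num [fibA_2, fibA_1]
theorem fibA_4 : fibA 4 = 3 := by rw [fibA]; norm_num [fibA_3, fibA_2]
theorem fibA_5 : fibA 5 = 5 := by rw [fibA]; norm_num [fibA_4, fibA_3]
theorem fibA_6 : fibA 6 = 8 := by rw [fibA]; norm_num [fibA_5, fibA_4]

theorem fibA_natCast (n : Nat) : fibA (n : Int) = (Nat.fib n : Int) := by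
  match n with
  | 0 => simpa using fibA_0
  | 1 => simpa using fibA_1
  | 2 => simpa using fibA_2
  | (m + 3) =>
    rw [fibA]
    have h0 : ¬ ((m + 3 : Nat) : Int) = 0 := by push_cast; omega
    have h3 : ¬ ((m + 3 : Nat) : Int) < 3 := by push_cast; omega
    rw [if_neg h0, if_neg h3]
    have e1 : ((m + 3 : Nat) : Int) - 1 = ((m + 2 : Nat) : Int) := by push_cast; ring
    have e2 : ((m + 3 : Nat) : Int) - 2 = ((m + 1 : Nat) : Int) := by push_cast; ring
    rw [e1, e2, fibA_natCast (m + 2), fibA_natCast (m + 1)]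
    have : Nat.fib (m + 3) = Nat.fib (m + 1) + Nat.fib (m + 2) := Nat.fib_add_two
    push_cast [this]; ring
termination_by n

theorem fib_lin (x : Int) (h : 6 ≤ x) : x + 1 ≤ fibA x := by
  by_cases h6 : x = 6
  · subst h6; rw [fibA_6]; omega
  · rw [fibA]
    split_ifs with h0 h3
    · omega
    · omega
    · have h1 := fib_lin (x - 1) (by omega)
      have h2 := fibA_pos (x - 2) (by omega)
      omega
termination_by x.toNat
decreasing_by all_goals omega

-- loopA returns m when fib(m) ≥ t and fib(k) < t for c ≤ k < m
theorem loopA_spec (t c m : Int) (hcm : c ≤ m) (hm : t ≤ fibA m)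
    (hlt : ∀ k, c ≤ k → k < m → fibA k < t) : loopA t c = m := by
  rw [loopA]
  split_ifs with hif
  · have hcm' : c < m := by
      rcases lt_or_eq_of_le hcm with h | h
      · exact h
      · subst h; omega
    exact loopA_spec t (c + 1) m (by omega) hm (fun k hk1 hk2 => hlt k (by omega) hk2)
  · rcases lt_or_eq_of_le hcm with h | h
    · exact absurd (hlt c le_rfl h) (by omega)
    · exact h
termination_by (m - c).toNat
decreasing_by omega

theorem loopA_le (t c m : Int) (hcm : c ≤ m) (hm : t ≤ fibA m) : loopA t c ≤ m := by
  rw [loopA]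
  split_ifs with hif
  · have hcm' : c < m := by
      rcases lt_or_eq_of_le hcm with h | h
      · exact h
      · subst h; omega
    exact loopA_le t (c + 1) m (by omega) hm
  · exact hcm
termination_by (m - c).toNat
decreasing_by omega

theorem genFibA_eq_map (s e : Int) : genFibA s e = (PySem.List.pyRange s e 1).map fibA := by
  simpa [genFibA] using PySem.List.foldl_append_singleton_eq_map fibA (PySem.List.pyRange s e 1) []

theorem chk_iff (lst : List Int) (n : Nat) :
    chkB (Nat.fib n : Int) (Nat.fib (n + 1) : Int) lst
      = decide (lst = (PySem.List.pyRange (n : Int) ((n : Int) + lst.length) 1).map fibA) := by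
  induction lst generalizing n with
  | nil =>
    rw [PySem.List.pyRange_one_eq_nil (by simp)]
    simp [chkB]
  | cons x r ih =>
    have hcons : PySem.List.pyRange (n : Int) ((n : Int) + (x :: r).length) 1
        = (n : Int) :: PySem.List.pyRange ((n : Int) + 1) ((n : Int) + (x :: r).length) 1 := by
      apply PySem.List.pyRange_one_cons
      simp only [List.length_cons]
      push_cast; omega
    rw [hcons]
    have hsum : ((Nat.fib n : Int)) + (Nat.fib (n + 1) : Int) = (Nat.fib (n + 1 + 1) : Int) := by
      have : Nat.fib (n + 2) = Nat.fib n + Nat.fib (n + 1) := Nat.fib_add_two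
      push_cast [this]; ring
    have hlen : ((n : Int) + 1) + (r.length : Int) = (n : Int) + ((x :: r).length : Int) := by
      simp only [List.length_cons]; push_cast; ring
    by_cases hx : x = (Nat.fib n : Int)
    · simp only [chkB, hx, ne_eq, not_true_eq_false, if_false]
      rw [hsum, ih (n + 1)]
      have e : ((n + 1 : Nat) : Int) = (n : Int) + 1 := by push_cast; ring
      rw [e, hlen]
      simp [List.map_cons, List.cons.injEq, fibA_natCast]
    · simp only [chkB, ne_eq, hx, not_false_eq_true, if_true]
      simp [List.map_cons, List.cons.injEq, fibA_natCast, hx]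

-- counter = target exactly for target ∈ {0, 1, 5, 6}
theorem loopA_eq_of_mem (t : Int) (h : t = 0 ∨ t = 1 ∨ t = 5 ∨ t = 6) : loopA t 0 = t := by
  rcases h with rfl | rfl | rfl | rfl
  · rw [loopA]; simp [fibA_0]
  · exact loopA_spec 1 0 1 (by omega) (by rw [fibA_1]) (by
      intro k h1 h2
      have hk : k = 0 := by omega
      rw [hk, fibA_0]; omega)
  · exact loopA_spec 5 0 5 (by omega) (by rw [fibA_5]) (by
      intro k h1 h2
      interval_cases k <;>
        first
          | (rw [fibA_0]; omega) | (rw [fibA_1]; omega) | (rw [fibA_2]; omega)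
          | (rw [fibA_3]; omega) | (rw [fibA_4]; omega))
  · exact loopA_spec 6 0 6 (by omega) (by rw [fibA_6]; omega) (by
      intro k h1 h2
      interval_cases k <;>
        first
          | (rw [fibA_0]; omega) | (rw [fibA_1]; omega) | (rw [fibA_2]; omega)
          | (rw [fibA_3]; omega) | (rw [fibA_4]; omega) | (rw [fibA_5]; omega))

theorem loopA_ne_of_not_mem (t : Int) (h : ¬ (t = 0 ∨ t = 1 ∨ t = 5 ∨ t = 6)) : loopA t 0 ≠ t := by
  push Not at h
  obtain ⟨h0, h1, h5, h6⟩ := h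
  by_cases h7 : 7 ≤ t
  · have hle : loopA t 0 ≤ t - 1 :=
      loopA_le t 0 (t - 1) (by omega) (by have := fib_lin (t - 1) (by omega); omega)
    omega
  · by_cases hneg : t < 0
    · rw [loopA]
      rw [if_neg (by rw [fibA_0]; omega)]
      omega
    · have ht : t = 2 ∨ t = 3 ∨ t = 4 := by omega
      rcases ht with rfl | rfl | rfl
      · rw [loopA_spec 2 0 3 (by omega) (by rw [fibA_3]) (by
          intro k h1 h2; interval_cases k <;>
            first
              | (rw [fibA_0]; omega) | (rw [fibA_1]; omega) | (rw [fibA_2]; omega))]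
        omega
      · rw [loopA_spec 3 0 4 (by omega) (by rw [fibA_4]) (by
          intro k h1 h2; interval_cases k <;>
            first
              | (rw [fibA_0]; omega) | (rw [fibA_1]; omega) | (rw [fibA_2]; omega)
              | (rw [fibA_3]; omega))]
        omega
      · rw [loopA_spec 4 0 5 (by omega) (by rw [fibA_5]; omega) (by
          intro k h1 h2; interval_cases k <;>
            first
              | (rw [fibA_0]; omega) | (rw [fibA_1]; omega) | (rw [fibA_2]; omega)
              | (rw [fibA_3]; omega) | (rw [fibA_4]; omega))]
        omega

-- ===== VERDICT (by name: the statement is the Claim_ definition above) =====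
theorem fib_check_spec : Claim_equal_fib_check := by
  intro lst _ hpre
  unfold Spec_fib_check
  obtain ⟨x, r, rfl⟩ : ∃ x r, lst = x :: r := by
    cases lst with
    | nil => exact absurd rfl hpre
    | cons x r => exact ⟨x, r, rfl⟩
  simp only [fib_check, fib_check_alt, PySem.List.pyGet?_zero_cons]
  by_cases hx : x = 0 ∨ x = 1 ∨ x = 5 ∨ x = 6
  · rw [if_pos hx]
    have hc : loopA x 0 = x := loopA_eq_of_mem x hx
    simp only [hc, ne_eq, not_true_eq_false, if_false]
    rw [genFibA_eq_map]
    rcases hx with rfl | rfl | rfl | rfl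
    · have h := chk_iff (0 :: r) 0
      rw [show ((Nat.fib 0 : Nat) : Int) = 0 from by decide,
          show ((Nat.fib (0 + 1) : Nat) : Int) = 1 from by decide,
          show ((0 : Nat) : Int) = 0 from by decide] at h
      exact h.symm
    · have h := chk_iff (1 :: r) 1
      rw [show ((Nat.fib 1 : Nat) : Int) = 1 from by decide,
          show ((Nat.fib (1 + 1) : Nat) : Int) = 1 from by decide,
          show ((1 : Nat) : Int) = 1 from by decide] at h
      exact h.symm
    · have h := chk_iff (5 :: r) 5
      rw [show ((Nat.fib 5 : Nat) : Int) = 5 from by decide,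
          show ((Nat.fib (5 + 1) : Nat) : Int) = 8 from by decide,
          show ((5 : Nat) : Int) = 5 from by decide] at h
      exact h.symm
    · have h := chk_iff (6 :: r) 6
      rw [show ((Nat.fib 6 : Nat) : Int) = 8 from by decide,
          show ((Nat.fib (6 + 1) : Nat) : Int) = 13 from by decide,
          show ((6 : Nat) : Int) = 6 from by decide] at h
      exact h.symm
  · rw [if_neg hx]
    have hc : loopA x 0 ≠ x := loopA_ne_of_not_mem x hx
    simp [hc]
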